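-- pv_equiv track=rewrite | github.com/SrinathBegudem/LEXSY_WEB_APP | backup_20251101_114452/backend/services/ai_service.py | _categorize_placeholders
-- ===== SOURCE A (Python) =====
-- from typing import Dict, List, Any, Optional, Tuple
--
-- def _categorize_placeholders(placeholders: List[Dict]) -> List[str]:
--     """
--     Categorize placeholders by their type/purpose.
--
--     Args:
--         placeholders (List[Dict]): List of placeholders
--
--     Returns:
--         List[str]: List of unique categories
--     """
--     categories = set()
--
--     for placeholder in placeholders:
--         name = placeholder.get('name', '').lower()
--
--         if any(term in name for term in ['company', 'entity', 'corporation', 'business']):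
--             categories.add('Company Information')
--         elif any(term in name for term in ['name', 'person', 'individual', 'party']):
--             categories.add('Personal Information')
--         elif any(term in name for term in ['date', 'time', 'deadline', 'effective', 'expiration']):
--             categories.add('Dates and Deadlines')
--         elif any(term in name for term in ['amount', 'price', 'fee', 'payment', 'valuation', '$']):
--             categories.add('Financial Terms')
--         elif any(term in name for term in ['address', 'location', 'jurisdiction', 'state', 'city']):
--             categories.add('Locations')
--         elif any(term in name for term in ['email', 'phone', 'contact', 'telephone']):
--             categories.add('Contact Information')
--         elif any(term in name for term in ['percentage', 'rate', 'discount', '%']):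
--             categories.add('Percentages and Rates')
--         else:
--             categories.add('Other Terms')
--
--     return sorted(list(categories))
-- ===== SOURCE B (Python) =====
-- from typing import Dict, List
--
-- _CATEGORY_TABLE = [
--     ('Company Information', ['company', 'entity', 'corporation', 'business']),
--     ('Personal Information', ['name', 'person', 'individual', 'party']),
--     ('Dates and Deadlines', ['date', 'time', 'deadline', 'effective', 'expiration']),
--     ('Financial Terms', ['amount', 'price', 'fee', 'payment', 'valuation', '$']),
--     ('Locations', ['address', 'location', 'jurisdiction', 'state', 'city']),
--     ('Contact Information', ['email', 'phone', 'contact', 'telephone']),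
--     ('Percentages and Rates', ['percentage', 'rate', 'discount', '%']),
-- ]
--
-- def _categorize_placeholders(placeholders: List[Dict]) -> List[str]:
--     # Invert the loops: instead of classifying each name with a priority chain,
--     # sieve the pool of names category by category.  A category is emitted when
--     # it captures (and removes) at least one name from the pool; the elif
--     # priority is realised by the removal, and whatever survives the whole
--     # sieve is 'Other Terms'.
--     names = [p.get('name', '').lower() for p in placeholders]
--     categories = set()
--     for category, terms in _CATEGORY_TABLE:
--         remaining = [n for n in names if not any(t in n for t in terms)]
--         if len(remaining) < len(names):
--             categories.add(category)
--         names = remaining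
--     if names:
--         categories.add('Other Terms')
--     return sorted(categories)
-- ===== Notes on version B (the rewrite author's own statement) =====
-- stated objective: alternative
-- what changed: Instead of classifying each placeholder name with a priority if/elif chain, B inverts the loops: it sieves the whole pool of lowered names category by category, emitting a category when it removes at least one name from the pool, with the survivors of the sieve becoming 'Other Terms'.
import Mathlib
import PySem

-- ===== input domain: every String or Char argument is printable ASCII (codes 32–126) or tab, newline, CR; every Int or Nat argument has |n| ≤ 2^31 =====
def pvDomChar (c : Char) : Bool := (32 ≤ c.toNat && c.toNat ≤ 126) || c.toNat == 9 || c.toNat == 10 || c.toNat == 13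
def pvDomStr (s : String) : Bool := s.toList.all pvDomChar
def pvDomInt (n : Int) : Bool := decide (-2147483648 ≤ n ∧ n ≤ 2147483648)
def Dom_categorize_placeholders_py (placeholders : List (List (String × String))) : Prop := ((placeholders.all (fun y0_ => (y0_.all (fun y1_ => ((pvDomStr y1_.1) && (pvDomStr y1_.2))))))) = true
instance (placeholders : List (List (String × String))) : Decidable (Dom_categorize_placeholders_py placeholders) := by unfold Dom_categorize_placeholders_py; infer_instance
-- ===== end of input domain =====

-- B inverts A's loops: instead of classifying each name with a priority if/elif chain,
-- it sieves the pool of lowered names category by category (a category is emitted when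
-- it removes a name from the pool; the survivors become 'Other Terms'); objective:
-- alternative, same cost.

-- ===== PORT A =====
-- literal transliteration of A: fold over placeholders, elif chain adding to a set, then sorted
def categorize_placeholders_py (placeholders : List (List (String × String))) : List String :=
  let categories : PySem.Set String :=
    placeholders.foldl (fun (cats : PySem.Set String) placeholder =>
      let name := PySem.Str.lower (PySem.Dict.getD (PySem.Dict.mk placeholder) "name" "")
      if (["company", "entity", "corporation", "business"].any fun t => PySem.Str.isIn t name) then
        PySem.Set.add cats "Company Information"
      else if (["name", "person", "individual", "party"].any fun t => PySem.Str.isIn t name) then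
        PySem.Set.add cats "Personal Information"
      else if (["date", "time", "deadline", "effective", "expiration"].any fun t => PySem.Str.isIn t name) then
        PySem.Set.add cats "Dates and Deadlines"
      else if (["amount", "price", "fee", "payment", "valuation", "$"].any fun t => PySem.Str.isIn t name) then
        PySem.Set.add cats "Financial Terms"
      else if (["address", "location", "jurisdiction", "state", "city"].any fun t => PySem.Str.isIn t name) then
        PySem.Set.add cats "Locations"
      else if (["email", "phone", "contact", "telephone"].any fun t => PySem.Str.isIn t name) then
        PySem.Set.add cats "Contact Information"
      else if (["percentage", "rate", "discount", "%"].any fun t => PySem.Str.isIn t name) then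
        PySem.Set.add cats "Percentages and Rates"
      else
        PySem.Set.add cats "Other Terms") PySem.Set.empty
  PySem.List.sorted categories (fun x => x) false

-- ===== PORT B =====
-- B's data table: ordered (category, terms) pairs
def pvCatTable : List (String × List String) :=
  [("Company Information", ["company", "entity", "corporation", "business"]),
   ("Personal Information", ["name", "person", "individual", "party"]),
   ("Dates and Deadlines", ["date", "time", "deadline", "effective", "expiration"]),
   ("Financial Terms", ["amount", "price", "fee", "payment", "valuation", "$"]),
   ("Locations", ["address", "location", "jurisdiction", "state", "city"]),
   ("Contact Information", ["email", "phone", "contact", "telephone"]),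
   ("Percentages and Rates", ["percentage", "rate", "discount", "%"])]

-- B: sieve the pool of lowered names category by category; state = (categories, pool)
def categorize_placeholders_py_alt (placeholders : List (List (String × String))) : List String :=
  let names0 := placeholders.map (fun p => PySem.Str.lower (PySem.Dict.getD (PySem.Dict.mk p) "name" ""))
  let st := pvCatTable.foldl (fun (st : PySem.Set String × List String) ct =>
      let remaining := st.2.filter (fun n => !(ct.2.any (fun t => PySem.Str.isIn t n)))
      (if remaining.length < st.2.length then PySem.Set.add st.1 ct.1 else st.1, remaining))
    (PySem.Set.empty, names0)
  let categories := if st.2 = [] then st.1 else PySem.Set.add st.1 "Other Terms"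
  PySem.List.sorted categories (fun x => x) false

-- ===== PRECONDITION & SPEC =====
def Spec_categorize_placeholders_py (placeholders : List (List (String × String))) (out : List String) : Prop := out = categorize_placeholders_py_alt placeholders
instance (placeholders : List (List (String × String))) (out : List String) : Decidable (Spec_categorize_placeholders_py placeholders out) := by unfold Spec_categorize_placeholders_py; infer_instance

-- ===== CLAIM (what is proved, stated in full; the proofs are below) =====
def Claim_equal_categorize_placeholders_py : Prop := ∀ (placeholders : List (List (String × String))), Dom_categorize_placeholders_py placeholders → Spec_categorize_placeholders_py placeholders (categorize_placeholders_py placeholders)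

-- ===== LEMMAS AND PROOFS =====

-- the lowered name of a placeholder
def pvName (p : List (String × String)) : String :=
  PySem.Str.lower (PySem.Dict.getD (PySem.Dict.mk p) "name" "")

-- does any term of ts occur in n?
def pvMatch (ts : List String) (n : String) : Bool :=
  ts.any (fun t => PySem.Str.isIn t n)

-- category assigned by a (priority-ordered) table, none if no group matches
def pvFirstCat? : List (String × List String) → String → Option String
  | [], _ => none
  | (c, ts) :: rest, n => if pvMatch ts n then some c else pvFirstCat? rest n

-- what A's elif chain computes for one name
def pvACat (n : String) : String := (pvFirstCat? pvCatTable n).getD "Other Terms"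

-- A's loop body is: add the chain's category for the placeholder's name
theorem pv_A_body (cats : PySem.Set String) (p : List (String × String)) :
    (let name := PySem.Str.lower (PySem.Dict.getD (PySem.Dict.mk p) "name" "")
     if (["company", "entity", "corporation", "business"].any fun t => PySem.Str.isIn t name) then
       PySem.Set.add cats "Company Information"
     else if (["name", "person", "individual", "party"].any fun t => PySem.Str.isIn t name) then
       PySem.Set.add cats "Personal Information"
     else if (["date", "time", "deadline", "effective", "expiration"].any fun t => PySem.Str.isIn t name) then
       PySem.Set.add cats "Dates and Deadlines"
     else if (["amount", "price", "fee", "payment", "valuation", "$"].any fun t => PySem.Str.isIn t name) then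
       PySem.Set.add cats "Financial Terms"
     else if (["address", "location", "jurisdiction", "state", "city"].any fun t => PySem.Str.isIn t name) then
       PySem.Set.add cats "Locations"
     else if (["email", "phone", "contact", "telephone"].any fun t => PySem.Str.isIn t name) then
       PySem.Set.add cats "Contact Information"
     else if (["percentage", "rate", "discount", "%"].any fun t => PySem.Str.isIn t name) then
       PySem.Set.add cats "Percentages and Rates"
     else
       PySem.Set.add cats "Other Terms") =
    PySem.Set.add cats (pvACat (pvName p)) := by
  simp only [pvACat, pvFirstCat?, pvCatTable, pvMatch, pvName]
  split_ifs <;> rfl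

-- B's sieve step function
def pvStep (st : PySem.Set String × List String) (ct : String × List String) :
    PySem.Set String × List String :=
  let remaining := st.2.filter (fun n => !(ct.2.any (fun t => PySem.Str.isIn t n)))
  (if remaining.length < st.2.length then PySem.Set.add st.1 ct.1 else st.1, remaining)

-- characterisation of B's fold over any table suffix: the surviving pool is the
-- names with no match in the suffix, and the emitted categories are those some
-- pooled name is first assigned to
theorem pv_fold_spec (tbl : List (String × List String)) (cats : PySem.Set String)
    (pool : List String) :
    (tbl.foldl pvStep (cats, pool)).2
        = pool.filter (fun n => (pvFirstCat? tbl n).isNone)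
    ∧ ∀ x, x ∈ (tbl.foldl pvStep (cats, pool)).1
        ↔ x ∈ cats ∨ ∃ n ∈ pool, pvFirstCat? tbl n = some x := by
  induction tbl generalizing cats pool with
  | nil => simp [pvFirstCat?]
  | cons ct rest ih =>
    obtain ⟨c, ts⟩ := ct
    simp only [List.foldl_cons]
    have hstep : pvStep (cats, pool) (c, ts) =
        (if (pool.filter (fun n => !(pvMatch ts n))).length < pool.length
           then PySem.Set.add cats c else cats,
         pool.filter (fun n => !(pvMatch ts n))) := rfl
    rw [hstep]
    obtain ⟨ih1, ih2⟩ := ih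
      (if (pool.filter (fun n => !(pvMatch ts n))).length < pool.length
         then PySem.Set.add cats c else cats)
      (pool.filter (fun n => !(pvMatch ts n)))
    constructor
    · rw [ih1, List.filter_filter]
      apply List.filter_congr
      intro n _
      simp only [pvFirstCat?]
      by_cases h : pvMatch ts n = true <;> simp [h]
    · intro x
      rw [ih2 x]
      have hlen : ((pool.filter (fun n => !(pvMatch ts n))).length < pool.length)
          ↔ ∃ n ∈ pool, pvMatch ts n = true := by
        rw [List.length_filter_lt_length_iff_exists]
        simp
      by_cases hm : ∃ n ∈ pool, pvMatch ts n = true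
      · rw [if_pos (hlen.mpr hm)]
        simp only [PySem.Set.mem_add, List.mem_filter, pvFirstCat?]
        constructor
        · rintro ((h | h) | ⟨n, ⟨hn, hnm⟩, hfc⟩)
          · exact Or.inl h
          · obtain ⟨n, hn, hmt⟩ := hm
            exact Or.inr ⟨n, hn, by simp [hmt, h]⟩
          · refine Or.inr ⟨n, hn, ?_⟩
            simp only [Bool.not_eq_eq_eq_not, Bool.not_true] at hnm
            simp [hnm, hfc]
        · rintro (h | ⟨n, hn, hfc⟩)
          · exact Or.inl (Or.inl h)
          · by_cases ht : pvMatch ts n = true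
            · simp only [ht, if_true, Option.some.injEq] at hfc
              exact Or.inl (Or.inr hfc.symm)
            · simp only [ht] at hfc
              exact Or.inr ⟨n, ⟨hn, by simp [ht]⟩, hfc⟩
      · rw [if_neg (fun h => hm (hlen.mp h))]
        simp only [List.mem_filter, pvFirstCat?]
        constructor
        · rintro (h | ⟨n, ⟨hn, hnm⟩, hfc⟩)
          · exact Or.inl h
          · refine Or.inr ⟨n, hn, ?_⟩
            simp only [Bool.not_eq_eq_eq_not, Bool.not_true] at hnm
            simp [hnm, hfc]
        · rintro (h | ⟨n, hn, hfc⟩)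
          · exact Or.inl h
          · have ht : pvMatch ts n ≠ true := fun ht => hm ⟨n, hn, ht⟩
            rw [if_neg ht] at hfc
            exact Or.inr ⟨n, ⟨hn, by simp [ht]⟩, hfc⟩
  
-- B's emitted categories stay duplicate-free
theorem pv_fold_nodup (tbl : List (String × List String)) (cats : PySem.Set String)
    (pool : List String) (h : cats.Nodup) :
    (tbl.foldl pvStep (cats, pool)).1.Nodup := by
  induction tbl generalizing cats pool with
  | nil => simpa using h
  | cons ct rest ih =>
    simp only [List.foldl_cons]
    apply ih
    split_ifs
    · exact PySem.Set.nodup_add _ _ h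
    · exact h

-- ===== VERDICT (by name: the statement is the Claim_ definition above) =====
theorem categorize_placeholders_py_spec : Claim_equal_categorize_placeholders_py := by
  intro placeholders _
  unfold Spec_categorize_placeholders_py categorize_placeholders_py categorize_placeholders_py_alt
  simp only
  -- rewrite A's loop body
  have hA : (fun (cats : PySem.Set String) p =>
      let name := PySem.Str.lower (PySem.Dict.getD (PySem.Dict.mk p) "name" "")
      if (["company", "entity", "corporation", "business"].any fun t => PySem.Str.isIn t name) then
        PySem.Set.add cats "Company Information"
      else if (["name", "person", "individual", "party"].any fun t => PySem.Str.isIn t name) then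
        PySem.Set.add cats "Personal Information"
      else if (["date", "time", "deadline", "effective", "expiration"].any fun t => PySem.Str.isIn t name) then
        PySem.Set.add cats "Dates and Deadlines"
      else if (["amount", "price", "fee", "payment", "valuation", "$"].any fun t => PySem.Str.isIn t name) then
        PySem.Set.add cats "Financial Terms"
      else if (["address", "location", "jurisdiction", "state", "city"].any fun t => PySem.Str.isIn t name) then
        PySem.Set.add cats "Locations"
      else if (["email", "phone", "contact", "telephone"].any fun t => PySem.Str.isIn t name) then
        PySem.Set.add cats "Contact Information"
      else if (["percentage", "rate", "discount", "%"].any fun t => PySem.Str.isIn t name) then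
        PySem.Set.add cats "Percentages and Rates"
      else
        PySem.Set.add cats "Other Terms") =
      (fun (cats : PySem.Set String) p => PySem.Set.add cats (pvACat (pvName p))) :=
    funext fun cats => funext fun p => pv_A_body cats p
  rw [hA]
  -- name the two unsorted sets and reduce to a permutation
  set names0 := placeholders.map (fun p => PySem.Str.lower (PySem.Dict.getD (PySem.Dict.mk p) "name" "")) with hnames0
  have hBfold : (pvCatTable.foldl (fun (st : PySem.Set String × List String) ct =>
      ((if (st.2.filter (fun n => !(ct.2.any (fun t => PySem.Str.isIn t n)))).length < st.2.length
          then PySem.Set.add st.1 ct.1 else st.1),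
        st.2.filter (fun n => !(ct.2.any (fun t => PySem.Str.isIn t n)))))
      (PySem.Set.empty, names0)) = pvCatTable.foldl pvStep (PySem.Set.empty, names0) := rfl
  rw [hBfold]
  obtain ⟨hpool, hmem⟩ := pv_fold_spec pvCatTable PySem.Set.empty names0
  -- A's set membership
  have hAmem : ∀ x, x ∈ placeholders.foldl
      (fun (cats : PySem.Set String) p => PySem.Set.add cats (pvACat (pvName p))) PySem.Set.empty
      ↔ ∃ p ∈ placeholders, x = pvACat (pvName p) := by
    intro x
    rw [PySem.Set.mem_foldl_add]
    simp [PySem.Set.empty]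
  have hAnodup : (placeholders.foldl
      (fun (cats : PySem.Set String) p => PySem.Set.add cats (pvACat (pvName p)))
      PySem.Set.empty).Nodup := by
    rw [show (placeholders.foldl
        (fun (cats : PySem.Set String) p => PySem.Set.add cats (pvACat (pvName p)))
        PySem.Set.empty) = PySem.Set.ofList (placeholders.map (fun p => pvACat (pvName p))) by
      rw [← PySem.Set.update_map_eq_foldl_add, ← PySem.Set.update_empty]]
    exact PySem.Set.nodup_ofList _
  -- B's final set
  set Bcats := (pvCatTable.foldl pvStep (PySem.Set.empty, names0)).1 with hBc
  have hBnodup : Bcats.Nodup := pv_fold_nodup _ _ _ (by simp [PySem.Set.empty])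
  have hBfinal : ∀ x,
      x ∈ (if (pvCatTable.foldl pvStep (PySem.Set.empty, names0)).2 = [] then Bcats
           else PySem.Set.add Bcats "Other Terms")
      ↔ x ∈ Bcats ∨ (x = "Other Terms" ∧ ∃ n ∈ names0, pvFirstCat? pvCatTable n = none) := by
    intro x
    rw [hpool]
    by_cases he : names0.filter (fun n => (pvFirstCat? pvCatTable n).isNone) = []
    · rw [if_pos he]
      simp only [List.filter_eq_nil_iff] at he
      constructor
      · exact Or.inl
      · rintro (h | ⟨_, n, hn, hfc⟩)
        · exact h
        · exact absurd (by simp [hfc]) (he n hn)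
    · rw [if_neg he, PySem.Set.mem_add]
      have hex : ∃ n ∈ names0, pvFirstCat? pvCatTable n = none := by
        obtain ⟨m, hm⟩ := List.exists_mem_of_ne_nil _ he
        have hmf := List.mem_filter.mp hm
        exact ⟨m, hmf.1, by simpa using hmf.2⟩
      constructor
      · rintro (h | h)
        · exact Or.inl h
        · exact Or.inr ⟨h, hex⟩
      · rintro (h | ⟨h, _⟩)
        · exact Or.inl h
        · exact Or.inr h
  -- equal membership of the two unsorted sets
  apply (PySem.List.sorted_id_eq_sorted_id_iff_perm _ _).mpr
  apply (List.perm_ext_iff_of_nodup hAnodup ?_).mpr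
  · intro x
    rw [hAmem, hBfinal, hmem]
    simp only [PySem.Set.empty, List.not_mem_nil, false_or]
    constructor
    · rintro ⟨p, hp, hx⟩
      have hn : pvName p ∈ names0 := by
        rw [hnames0]; exact List.mem_map.mpr ⟨p, hp, rfl⟩
      cases hfc : pvFirstCat? pvCatTable (pvName p) with
      | none => exact Or.inr ⟨by simp [hx, pvACat, hfc], pvName p, hn, hfc⟩
      | some c =>
        refine Or.inl ⟨pvName p, hn, ?_⟩
        rw [hfc]; simp [hx, pvACat, hfc]
    · rintro (⟨n, hn, hfc⟩ | ⟨hx, n, hn, hfc⟩)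
      all_goals {
        rw [hnames0] at hn
        obtain ⟨p, hp, hpn⟩ := List.mem_map.mp hn
        refine ⟨p, hp, ?_⟩
        simp [pvACat, pvName, hpn, hfc]
        try simp [hx]
      }
  · split_ifs
    · exact hBnodup
    · exact PySem.Set.nodup_add _ _ hBnodup
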